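-- pv_equiv track=rewrite | github.com/actaross/cloud-run-hackathon-python | main.py | is_any_opponent_in_front
-- ===== SOURCE A (Python) =====
-- def is_any_opponent_in_front(player_x, player_y, player_direction, opponents_data):
--     range_distance = 3
--
--     for opponent in opponents_data:
--         opp_x, opp_y = opponent['position']
--
--         if (
--             (player_direction == 'N' and opp_x == player_x and opp_y > player_y and opp_y - player_y <= range_distance) or
--             (player_direction == 'S' and opp_x == player_x and opp_y < player_y and player_y - opp_y <= range_distance) or
--             (player_direction == 'W' and opp_y == player_y and opp_x > player_x and opp_x - player_x <= range_distance) or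
--             (player_direction == 'E' and opp_y == player_y and opp_x < player_x and player_x - opp_x <= range_distance)
--         ):
--             return True
--
--     return False
-- ===== SOURCE B (Python) =====
-- def is_any_opponent_in_front(player_x, player_y, player_direction, opponents_data):
--     # Staged approach: collect all opponent positions into a set first, then
--     # probe the (at most 3) cells in front of the player against that set.
--     positions = {(opp['position'][0], opp['position'][1]) for opp in opponents_data}
--     steps = {'N': (0, 1), 'S': (0, -1), 'W': (1, 0), 'E': (-1, 0)}
--     if player_direction not in steps:
--         return False
--     sx, sy = steps[player_direction]
--     return any((player_x + k * sx, player_y + k * sy) in positions for k in (1, 2, 3))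
-- ===== Notes on version B (the rewrite author's own statement) =====
-- stated objective: alternative
-- what changed: Instead of scanning opponents and testing each against four per-direction comparison branches, B first builds a set of all opponent positions and then probes only the three cells directly in front of the player for membership in that set; the scan over opponents with a per-opponent geometric test disappears.
-- outside the precondition, e.g. on is_any_opponent_in_front(0, 0, 'N', [{'position': (0, 1)}, {}]): A returns True, B raises KeyError
import Mathlib
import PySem

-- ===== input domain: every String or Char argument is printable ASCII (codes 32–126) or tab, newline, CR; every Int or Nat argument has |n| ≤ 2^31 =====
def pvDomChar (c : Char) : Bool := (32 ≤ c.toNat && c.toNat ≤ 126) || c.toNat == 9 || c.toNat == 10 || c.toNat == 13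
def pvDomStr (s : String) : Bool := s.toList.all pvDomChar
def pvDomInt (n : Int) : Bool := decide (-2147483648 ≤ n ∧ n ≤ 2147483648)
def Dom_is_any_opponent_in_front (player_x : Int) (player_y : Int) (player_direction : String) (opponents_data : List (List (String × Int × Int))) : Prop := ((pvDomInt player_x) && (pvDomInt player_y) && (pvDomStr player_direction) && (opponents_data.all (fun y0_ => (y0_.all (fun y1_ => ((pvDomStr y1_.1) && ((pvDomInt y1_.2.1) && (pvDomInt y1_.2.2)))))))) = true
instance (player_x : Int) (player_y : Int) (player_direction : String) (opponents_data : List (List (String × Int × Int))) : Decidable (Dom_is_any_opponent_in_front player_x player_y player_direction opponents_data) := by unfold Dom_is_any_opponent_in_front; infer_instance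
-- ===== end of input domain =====

-- B replaces A's scan-opponents-with-four-branch-test by building a set of opponent positions and probing the three cells in front of the player (alternative decomposition; return value proved equal on Pre_).

-- ===== PORT A =====
def pvLoopA (player_x : Int) (player_y : Int) (player_direction : String) : List (List (String × Int × Int)) → Bool
  | [] => false
  | opponent :: rest =>
    match opponent.lookup "position" with
    | none => false  -- Python raises KeyError here; excluded by Pre_
    | some (opp_x, opp_y) =>
      if (player_direction == "N" && opp_x == player_x && opp_y > player_y && opp_y - player_y ≤ (3 : Int)) ||
         (player_direction == "S" && opp_x == player_x && opp_y < player_y && player_y - opp_y ≤ (3 : Int)) ||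
         (player_direction == "W" && opp_y == player_y && opp_x > player_x && opp_x - player_x ≤ (3 : Int)) ||
         (player_direction == "E" && opp_y == player_y && opp_x < player_x && player_x - opp_x ≤ (3 : Int)) then
        true
      else
        pvLoopA player_x player_y player_direction rest

def is_any_opponent_in_front (player_x : Int) (player_y : Int) (player_direction : String) (opponents_data : List (List (String × Int × Int))) : Bool :=
  pvLoopA player_x player_y player_direction opponents_data

-- ===== PORT B =====
def pvStepDict : PySem.Dict String (Int × Int) :=
  PySem.Dict.ofList [("N", ((0:Int), (1:Int))), ("S", (0, -1)), ("W", (1, 0)), ("E", (-1, 0))]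

def is_any_opponent_in_front_alt (player_x : Int) (player_y : Int) (player_direction : String) (opponents_data : List (List (String × Int × Int))) : Bool :=
  -- set comprehension over opponents' positions (default is unreachable: Python raises KeyError, excluded by Pre_)
  let positions : PySem.Set (Int × Int) :=
    PySem.Set.ofList (opponents_data.map (fun opp => (opp.lookup "position").getD (0, 0)))
  match PySem.Dict.get? pvStepDict player_direction with
  | none => false
  | some (sx, sy) =>
      [(1:Int), 2, 3].any (fun k => PySem.Set.contains positions (player_x + k * sx, player_y + k * sy))

-- ===== PRECONDITION & SPEC =====
-- Pre_ excludes exactly the inputs where some opponent lacks the key "position": B always raises KeyError there,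
-- and A raises too unless an earlier opponent already matched (see cites).
def Pre_is_any_opponent_in_front (player_x : Int) (player_y : Int) (player_direction : String) (opponents_data : List (List (String × Int × Int))) : Prop :=
  ∀ opp ∈ opponents_data, (opp.lookup "position").isSome
instance (player_x : Int) (player_y : Int) (player_direction : String) (opponents_data : List (List (String × Int × Int))) : Decidable (Pre_is_any_opponent_in_front player_x player_y player_direction opponents_data) := by unfold Pre_is_any_opponent_in_front; infer_instance

def pvWitness_is_any_opponent_in_front : Int × Int × String × (List (List (String × Int × Int))) :=
  (0, 0, "N", [[("position", 0, 2)]])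

def Spec_is_any_opponent_in_front (player_x : Int) (player_y : Int) (player_direction : String) (opponents_data : List (List (String × Int × Int))) (out : Bool) : Prop := out = is_any_opponent_in_front_alt player_x player_y player_direction opponents_data
instance (player_x : Int) (player_y : Int) (player_direction : String) (opponents_data : List (List (String × Int × Int))) (out : Bool) : Decidable (Spec_is_any_opponent_in_front player_x player_y player_direction opponents_data out) := by unfold Spec_is_any_opponent_in_front; infer_instance

-- ===== CLAIM =====
def Claim_equal_is_any_opponent_in_front : Prop := ∀ (player_x : Int) (player_y : Int) (player_direction : String) (opponents_data : List (List (String × Int × Int))), Dom_is_any_opponent_in_front player_x player_y player_direction opponents_data → Pre_is_any_opponent_in_front player_x player_y player_direction opponents_data → Spec_is_any_opponent_in_front player_x player_y player_direction opponents_data (is_any_opponent_in_front player_x player_y player_direction opponents_data)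

-- ===== LEMMAS AND PROOFS =====
-- A's per-opponent condition, factored for the proof.
def pvCondA (px py : Int) (d : String) (p : Int × Int) : Bool :=
  (d == "N" && p.1 == px && p.2 > py && p.2 - py ≤ (3 : Int)) ||
  (d == "S" && p.1 == px && p.2 < py && py - p.2 ≤ (3 : Int)) ||
  (d == "W" && p.2 == py && p.1 > px && p.1 - px ≤ (3 : Int)) ||
  (d == "E" && p.2 == py && p.1 < px && px - p.1 ≤ (3 : Int))

theorem pvLoopA_eq_any (px py : Int) (d : String) (l : List (List (String × Int × Int)))
    (hpre : ∀ opp ∈ l, (opp.lookup "position").isSome) :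
    pvLoopA px py d l = l.any (fun o => pvCondA px py d ((o.lookup "position").getD (0, 0))) := by
  induction l with
  | nil => simp [pvLoopA]
  | cons opp rest ih =>
    have h1 := hpre opp (List.mem_cons_self ..)
    have hrest : ∀ o ∈ rest, (o.lookup "position").isSome := fun o ho => hpre o (List.mem_cons_of_mem _ ho)
    obtain ⟨⟨ox, oy⟩, hs⟩ := Option.isSome_iff_exists.mp h1
    rw [pvLoopA, List.any_cons, ih hrest, hs]
    change (if pvCondA px py d (ox, oy) = true then true else _) = (pvCondA px py d (ox, oy) || _)
    cases hb : pvCondA px py d (ox, oy) <;> simp [hb]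

-- The step dictionary at each of its keys, and at any other string.
theorem pvStepN : PySem.Dict.get? pvStepDict "N" = some (0, 1) := by decide
theorem pvStepS : PySem.Dict.get? pvStepDict "S" = some (0, -1) := by decide
theorem pvStepW : PySem.Dict.get? pvStepDict "W" = some (1, 0) := by decide
theorem pvStepE : PySem.Dict.get? pvStepDict "E" = some (-1, 0) := by decide
theorem pvStepOther (d : String) (hN : ¬ d = "N") (hS : ¬ d = "S") (hW : ¬ d = "W") (hE : ¬ d = "E") :
    PySem.Dict.get? pvStepDict d = none := by
  have hN' : ("N" == d) = false := by simp [Ne.symm hN]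
  have hS' : ("S" == d) = false := by simp [Ne.symm hS]
  have hW' : ("W" == d) = false := by simp [Ne.symm hW]
  have hE' : ("E" == d) = false := by simp [Ne.symm hE]
  simp [pvStepDict, PySem.Dict.get?, PySem.Dict.ofList, PySem.Dict.empty,
        PySem.Dict.update, PySem.Dict.insert, hN', hS', hW', hE']

-- A's condition holds iff the position is one of the three probed cells.
theorem pvCondA_iff_target (px py sx sy : Int) (d : String) (p : Int × Int)
    (hd : PySem.Dict.get? pvStepDict d = some (sx, sy)) :
    pvCondA px py d p = true ↔ ∃ k ∈ ([(1:Int), 2, 3] : List Int), p = (px + k * sx, py + k * sy) := by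
  obtain ⟨x, y⟩ := p
  by_cases hN : d = "N"
  · subst hN; rw [pvStepN] at hd; obtain ⟨h1, h2⟩ := Prod.mk.injEq .. ▸ (Option.some.injEq .. ▸ hd)
    subst h1; subst h2
    simp [pvCondA, Prod.ext_iff]; omega
  · by_cases hS : d = "S"
    · subst hS; rw [pvStepS] at hd; obtain ⟨h1, h2⟩ := Prod.mk.injEq .. ▸ (Option.some.injEq .. ▸ hd)
      subst h1; subst h2
      simp [pvCondA, Prod.ext_iff]; omega
    · by_cases hW : d = "W"
      · subst hW; rw [pvStepW] at hd; obtain ⟨h1, h2⟩ := Prod.mk.injEq .. ▸ (Option.some.injEq .. ▸ hd)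
        subst h1; subst h2
        simp [pvCondA, hN, hS, Prod.ext_iff]; omega
      · by_cases hE : d = "E"
        · subst hE; rw [pvStepE] at hd; obtain ⟨h1, h2⟩ := Prod.mk.injEq .. ▸ (Option.some.injEq .. ▸ hd)
          subst h1; subst h2
          simp [pvCondA, hN, hS, hW, Prod.ext_iff]; omega
        · rw [pvStepOther d hN hS hW hE] at hd; cases hd

theorem pvCondA_false_other (px py : Int) (d : String) (p : Int × Int)
    (hN : ¬ d = "N") (hS : ¬ d = "S") (hW : ¬ d = "W") (hE : ¬ d = "E") :
    pvCondA px py d p = false := by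
  simp [pvCondA, hN, hS, hW, hE]

-- ===== VERDICT =====
theorem is_any_opponent_in_front_spec : Claim_equal_is_any_opponent_in_front := by
  intro px py d l _ hpre
  unfold Spec_is_any_opponent_in_front is_any_opponent_in_front
  rw [pvLoopA_eq_any px py d l hpre]
  unfold is_any_opponent_in_front_alt
  by_cases hkey : ∃ v, PySem.Dict.get? pvStepDict d = some v
  · obtain ⟨⟨sx, sy⟩, hd⟩ := hkey
    rw [hd]
    rw [Bool.eq_iff_iff]
    simp only [List.any_eq_true, PySem.Set.contains_iff, PySem.Set.mem_ofList, List.mem_map]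
    constructor
    · rintro ⟨o, ho, hc⟩
      obtain ⟨k, hk, hp⟩ := (pvCondA_iff_target px py sx sy d _ hd).mp hc
      exact ⟨k, hk, o, ho, hp⟩
    · rintro ⟨k, hk, o, ho, hpo⟩
      exact ⟨o, ho, (pvCondA_iff_target px py sx sy d _ hd).mpr ⟨k, hk, hpo⟩⟩
  · push_neg at hkey
    have hnone : PySem.Dict.get? pvStepDict d = none := by
      cases h : PySem.Dict.get? pvStepDict d with
      | none => rfl
      | some v => exact absurd h (hkey v)
    rw [hnone]
    by_cases hN : d = "N"
    · exact absurd (hN ▸ pvStepN) (hkey _)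
    · by_cases hS : d = "S"
      · exact absurd (hS ▸ pvStepS) (hkey _)
      · by_cases hW : d = "W"
        · exact absurd (hW ▸ pvStepW) (hkey _)
        · by_cases hE : d = "E"
          · exact absurd (hE ▸ pvStepE) (hkey _)
          · simp [pvCondA_false_other px py d _ hN hS hW hE]
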